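-- pv_equiv track=rewrite | github.com/TolgahanKARA/locatorsync | core/patcher/VuePatcher.py | _find_tag_end
-- ===== SOURCE A (Python) =====
-- from typing import Optional
--
-- def _find_tag_end(content: str, start: int) -> Optional[int]:
--     i, in_single, in_double = start, False, False
--     while i < len(content):
--         c = content[i]
--         if c == '"' and not in_single:
--             in_double = not in_double
--         elif c == "'" and not in_double:
--             in_single = not in_single
--         elif not in_single and not in_double and c == ">":
--             return i
--         i += 1
--     return None
-- ===== SOURCE B (Python) =====
-- def _find_tag_end(content, start):
--     n = len(content)
--     i = start
--     while i < n:
--         c = content[i]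
--         if c == '>':
--             return i
--         if c == '"' or c == "'":
--             i += 1
--             while i < n and content[i] != c:
--                 i += 1
--             if i == n:
--                 return None
--         i += 1
--     return None
-- ===== Notes on version B (the rewrite author's own statement) =====
-- stated objective: alternative
-- what changed: Replaced A's single char-by-char loop with in_single/in_double boolean quote-state flags by a stateless two-level scan whose inner loop consumes each quoted span wholesale up to its matching closing quote.
import Mathlib
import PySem

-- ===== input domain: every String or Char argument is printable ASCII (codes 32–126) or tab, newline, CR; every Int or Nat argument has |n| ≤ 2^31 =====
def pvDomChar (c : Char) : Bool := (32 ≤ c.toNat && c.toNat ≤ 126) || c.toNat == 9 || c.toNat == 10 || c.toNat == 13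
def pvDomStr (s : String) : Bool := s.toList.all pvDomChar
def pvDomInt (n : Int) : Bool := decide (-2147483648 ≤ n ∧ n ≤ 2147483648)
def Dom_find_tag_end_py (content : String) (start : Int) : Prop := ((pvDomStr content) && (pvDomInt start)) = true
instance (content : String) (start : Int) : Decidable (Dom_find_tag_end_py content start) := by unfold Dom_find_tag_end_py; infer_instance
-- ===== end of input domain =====

-- B replaces A's in_single/in_double boolean state machine by a stateless scan whose inner
-- loop consumes each quoted span wholesale (objective: alternative decomposition, same O(n)).

-- ===== PORT A =====
-- A's while loop; i, in_single, in_double are the loop state; fuel only guards totality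
-- (the wrappers pass enough fuel for every input); none also encodes IndexError (i < -len).
def aLoop (cs : List Char) (fuel : Nat) (i : Int) (insg indq : Bool) : Option Int :=
  match fuel with
  | 0 => none
  | f + 1 =>
    if i < (cs.length : Int) then
      match PySem.List.pyGet? cs i with
      | none => none
      | some c =>
        if c = '"' ∧ insg = false then aLoop cs f (i+1) insg (!indq)
        else if c = '\'' ∧ indq = false then aLoop cs f (i+1) (!insg) indq
        else if insg = false ∧ indq = false ∧ c = '>' then some i
        else aLoop cs f (i+1) insg indq
    else none

def find_tag_end_py (content : String) (start : Int) : Option Int :=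
  aLoop content.toList (((content.toList.length : Int) - start).toNat + 1) start false false

-- ===== PORT B =====
-- B's inner while loop: advance i until i = n or content[i] = q; none at fuel 0 is unreachable
-- from the wrapper; none also encodes IndexError.
def bSkip (cs : List Char) (q : Char) (fuel : Nat) (i : Int) : Option Int :=
  match fuel with
  | 0 => none
  | f + 1 =>
    if i < (cs.length : Int) then
      match PySem.List.pyGet? cs i with
      | none => none
      | some c => if c = q then some i else bSkip cs q f (i+1)
    else some i

-- B's outer while loop
def bLoop (cs : List Char) (fuel : Nat) (i : Int) : Option Int :=
  match fuel with
  | 0 => none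
  | f + 1 =>
    if i < (cs.length : Int) then
      match PySem.List.pyGet? cs i with
      | none => none
      | some c =>
        if c = '>' then some i
        else if c = '"' ∨ c = '\'' then
          match bSkip cs c f (i+1) with
          | none => none
          | some j => if j = (cs.length : Int) then none else bLoop cs f (j+1)
        else bLoop cs f (i+1)
    else none

def find_tag_end_py_alt (content : String) (start : Int) : Option Int :=
  bLoop content.toList (((content.toList.length : Int) - start).toNat + 1) start

-- ===== PRECONDITION & SPEC =====
-- Pre_ excludes exactly the inputs where Python A raises IndexError: start < -len(content) on nonempty content.
def Pre_find_tag_end_py (content : String) (start : Int) : Prop :=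
  -(content.toList.length : Int) ≤ start
instance (content : String) (start : Int) : Decidable (Pre_find_tag_end_py content start) := by
  unfold Pre_find_tag_end_py; infer_instance

def pvWitness_find_tag_end_py : String × Int := ("<a href='x>y'>", 0)

def Spec_find_tag_end_py (content : String) (start : Int) (out : Option Int) : Prop := out = find_tag_end_py_alt content start
instance (content : String) (start : Int) (out : Option Int) : Decidable (Spec_find_tag_end_py content start out) := by unfold Spec_find_tag_end_py; infer_instance

-- ===== CLAIM (what is proved, stated in full; the proofs are below) =====
def Claim_equal_find_tag_end_py : Prop := ∀ (content : String) (start : Int), Dom_find_tag_end_py content start → Pre_find_tag_end_py content start → Spec_find_tag_end_py content start (find_tag_end_py content start)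

-- ===== LEMMAS AND PROOFS =====

-- one-step unfolding equations (definitional)
theorem aLoop_succ (cs : List Char) (f : Nat) (i : Int) (insg indq : Bool) :
    aLoop cs (f+1) i insg indq =
      (if i < (cs.length : Int) then
        match PySem.List.pyGet? cs i with
        | none => none
        | some c =>
          if c = '"' ∧ insg = false then aLoop cs f (i+1) insg (!indq)
          else if c = '\'' ∧ indq = false then aLoop cs f (i+1) (!insg) indq
          else if insg = false ∧ indq = false ∧ c = '>' then some i
          else aLoop cs f (i+1) insg indq
      else none) := rfl

theorem bSkip_succ (cs : List Char) (q : Char) (f : Nat) (i : Int) :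
    bSkip cs q (f+1) i =
      (if i < (cs.length : Int) then
        match PySem.List.pyGet? cs i with
        | none => none
        | some c => if c = q then some i else bSkip cs q f (i+1)
      else some i) := rfl

theorem bLoop_succ (cs : List Char) (f : Nat) (i : Int) :
    bLoop cs (f+1) i =
      (if i < (cs.length : Int) then
        match PySem.List.pyGet? cs i with
        | none => none
        | some c =>
          if c = '>' then some i
          else if c = '"' ∨ c = '\'' then
            match bSkip cs c f (i+1) with
            | none => none
            | some j => if j = (cs.length : Int) then none else bLoop cs f (j+1)
          else bLoop cs f (i+1)
      else none) := rfl

theorem bSkip_ge (cs : List Char) (q : Char) :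
    ∀ (f : Nat) (i j : Int), bSkip cs q f i = some j → i ≤ j := by
  intro f
  induction f with
  | zero => intro i j h; simp [bSkip] at h
  | succ f ih =>
      intro i j h
      rw [bSkip_succ] at h
      by_cases hlt : i < (cs.length : Int)
      · rw [if_pos hlt] at h
        rcases hg : PySem.List.pyGet? cs i with _ | c
        · simp [hg] at h
        · simp only [hg] at h
          by_cases hc : c = q
          · rw [if_pos hc] at h; simp at h; omega
          · rw [if_neg hc] at h; have := ih _ _ h; omega
      · rw [if_neg hlt] at h; simp at h; omega

-- with enough fuel, the exact amount of fuel is irrelevant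
theorem aLoop_irrel (cs : List Char) :
    ∀ (f f' : Nat) (i : Int) (b1 b2 : Bool),
      (cs.length : Int) ≤ i + f → (cs.length : Int) ≤ i + f' →
      aLoop cs (f+1) i b1 b2 = aLoop cs (f'+1) i b1 b2 := by
  intro f
  induction f with
  | zero =>
      intro f' i b1 b2 hf hf'
      have hlt : ¬ i < (cs.length : Int) := by omega
      conv_lhs => rw [aLoop_succ]
      conv_rhs => rw [aLoop_succ]
      rw [if_neg hlt, if_neg hlt]
  | succ f ih =>
      intro f' i b1 b2 hf hf'
      by_cases hlt : i < (cs.length : Int)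
      · obtain ⟨g, rfl⟩ : ∃ g, f' = g + 1 := ⟨f' - 1, by omega⟩
        conv_lhs => rw [aLoop_succ]
        conv_rhs => rw [aLoop_succ]
        rw [if_pos hlt, if_pos hlt]
        rcases hg : PySem.List.pyGet? cs i with _ | c
        · simp only [hg]
        · simp only [hg]
          split_ifs <;> first | rfl | exact ih g (i+1) _ _ (by omega) (by omega)
      · conv_lhs => rw [aLoop_succ]
        conv_rhs => rw [aLoop_succ]
        rw [if_neg hlt, if_neg hlt]

-- A inside a quoted span opened by q equals: skip to the closing q, then resume at top level.
theorem aLoop_quote (cs : List Char) (q : Char) (insg indq : Bool)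
    (hb : (q = '"' ∧ insg = false ∧ indq = true) ∨ (q = '\'' ∧ insg = true ∧ indq = false)) :
    ∀ (f : Nat) (i : Int), (cs.length : Int) ≤ i + f → i ≤ (cs.length : Int) →
    aLoop cs (f+1) i insg indq =
      (match bSkip cs q (f+1) i with
       | none => none
       | some j => if j = (cs.length : Int) then none else aLoop cs (f+1) (j+1) false false) := by
  intro f
  induction f with
  | zero =>
      intro i hf hi
      have hlt : ¬ i < (cs.length : Int) := by omega
      have hA : aLoop cs 1 i insg indq = none := by rw [aLoop_succ, if_neg hlt]
      have hs : bSkip cs q 1 i = some i := by rw [bSkip_succ, if_neg hlt]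
      rw [hA]; simp only [hs]
      rw [if_pos (show i = (cs.length : Int) by omega)]
  | succ f ih =>
      intro i hf hi
      by_cases hlt : i < (cs.length : Int)
      · rcases hg : PySem.List.pyGet? cs i with _ | c
        · -- IndexError in both
          have hA : aLoop cs (f+1+1) i insg indq = none := by
            rw [aLoop_succ, if_pos hlt]; simp only [hg]
          have hs : bSkip cs q (f+1+1) i = none := by
            rw [bSkip_succ, if_pos hlt]; simp only [hg]
          rw [hA]; simp only [hs]
        · by_cases hc : c = q
          · -- closing quote found: both resume after it at top level
            have hs : bSkip cs q (f+1+1) i = some i := by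
              rw [bSkip_succ, if_pos hlt]; simp only [hg]; rw [if_pos hc]
            have hA : aLoop cs (f+1+1) i insg indq = aLoop cs (f+1) (i+1) false false := by
              rw [aLoop_succ, if_pos hlt]; simp only [hg]
              rcases hb with ⟨hq, h1, h2⟩ | ⟨hq, h1, h2⟩ <;> subst hq h1 h2 <;> subst hc <;> simp
            rw [hA]; simp only [hs]
            rw [if_neg (show ¬ i = (cs.length : Int) by omega)]
            exact aLoop_irrel cs f (f+1) (i+1) false false (by omega) (by omega)
          · -- still inside the quoted span
            have hs : bSkip cs q (f+1+1) i = bSkip cs q (f+1) (i+1) := by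
              rw [bSkip_succ, if_pos hlt]; simp only [hg]; rw [if_neg hc]
            have hA : aLoop cs (f+1+1) i insg indq = aLoop cs (f+1) (i+1) insg indq := by
              rw [aLoop_succ, if_pos hlt]; simp only [hg]
              rcases hb with ⟨hq, h1, h2⟩ | ⟨hq, h1, h2⟩ <;> subst hq h1 h2 <;> simp [hc]
            rw [hA, hs, ih (i+1) (by omega) (by omega)]
            rcases hs' : bSkip cs q (f+1) (i+1) with _ | j
            · simp only [hs']
            · have hj1 := bSkip_ge cs q (f+1) (i+1) j hs'
              simp only [hs']
              by_cases hjl : j = (cs.length : Int)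
              · rw [if_pos hjl, if_pos hjl]
              · rw [if_neg hjl, if_neg hjl]
                exact aLoop_irrel cs f (f+1) (j+1) false false (by omega) (by omega)
      · -- i = len: A's loop ends with None, B's skip stops at len
        have hA : aLoop cs (f+1+1) i insg indq = none := by rw [aLoop_succ, if_neg hlt]
        have hs : bSkip cs q (f+1+1) i = some i := by rw [bSkip_succ, if_neg hlt]
        rw [hA]; simp only [hs]
        rw [if_pos (show i = (cs.length : Int) by omega)]

theorem aLoop_eq_bLoop (cs : List Char) :
    ∀ (f : Nat) (i : Int), (cs.length : Int) ≤ i + f →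
      aLoop cs (f+1) i false false = bLoop cs (f+1) i := by
  intro f
  induction f with
  | zero =>
      intro i hf
      have hlt : ¬ i < (cs.length : Int) := by omega
      rw [aLoop_succ, bLoop_succ, if_neg hlt, if_neg hlt]
  | succ f ih =>
      intro i hf
      by_cases hlt : i < (cs.length : Int)
      · rcases hg : PySem.List.pyGet? cs i with _ | c
        · have hA : aLoop cs (f+1+1) i false false = none := by
            rw [aLoop_succ, if_pos hlt]; simp only [hg]
          have hB : bLoop cs (f+1+1) i = none := by
            rw [bLoop_succ, if_pos hlt]; simp only [hg]
          rw [hA, hB]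
        · by_cases hgt : c = '>'
          · subst hgt
            have hA : aLoop cs (f+1+1) i false false = some i := by
              rw [aLoop_succ, if_pos hlt]; simp only [hg]; simp
            have hB : bLoop cs (f+1+1) i = some i := by
              rw [bLoop_succ, if_pos hlt]; simp only [hg]; simp
            rw [hA, hB]
          · by_cases hq : c = '"' ∨ c = '\''
            · -- a quote opens: A switches state, B calls its inner skip loop
              have hB : bLoop cs (f+1+1) i =
                  (match bSkip cs c (f+1) (i+1) with
                   | none => none
                   | some j => if j = (cs.length : Int) then none
                               else bLoop cs (f+1) (j+1)) := by
                rw [bLoop_succ, if_pos hlt]; simp only [hg]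
                rw [if_neg hgt, if_pos hq]
              have hA : aLoop cs (f+1+1) i false false =
                  aLoop cs (f+1) (i+1)
                    (if c = '\'' then true else false) (if c = '"' then true else false) := by
                rw [aLoop_succ, if_pos hlt]; simp only [hg]
                rcases hq with hq | hq <;> subst hq <;> simp
              have hquote :
                  aLoop cs (f+1) (i+1)
                      (if c = '\'' then true else false) (if c = '"' then true else false) =
                    (match bSkip cs c (f+1) (i+1) with
                     | none => none
                     | some j => if j = (cs.length : Int) then none
                                 else aLoop cs (f+1) (j+1) false false) := by
                rcases hq with hq | hq <;> subst hq
                · simpa using aLoop_quote cs '"' false true (Or.inl ⟨rfl, rfl, rfl⟩)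
                    f (i+1) (by omega) (by omega)
                · simpa using aLoop_quote cs '\'' true false (Or.inr ⟨rfl, rfl, rfl⟩)
                    f (i+1) (by omega) (by omega)
              rw [hA, hquote, hB]
              rcases hs : bSkip cs c (f+1) (i+1) with _ | j
              · simp only [hs]
              · have hj1 := bSkip_ge cs c (f+1) (i+1) j hs
                simp only [hs]
                by_cases hjl : j = (cs.length : Int)
                · rw [if_pos hjl, if_pos hjl]
                · rw [if_neg hjl, if_neg hjl]
                  exact ih (j+1) (by omega)
            · -- ordinary character: both just advance
              push Not at hq
              have hA : aLoop cs (f+1+1) i false false = aLoop cs (f+1) (i+1) false false := by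
                rw [aLoop_succ, if_pos hlt]; simp only [hg]
                simp [hq.1, hq.2, hgt]
              have hB : bLoop cs (f+1+1) i = bLoop cs (f+1) (i+1) := by
                rw [bLoop_succ, if_pos hlt]; simp only [hg]
                rw [if_neg hgt, if_neg (by push Not; exact hq)]
              rw [hA, hB]; exact ih (i+1) (by omega)
      · rw [aLoop_succ, bLoop_succ, if_neg hlt, if_neg hlt]

-- ===== VERDICT (by name: the statement is the Claim_ definition above) =====
theorem find_tag_end_py_spec : Claim_equal_find_tag_end_py := by
  intro content start _ _
  unfold Spec_find_tag_end_py find_tag_end_py find_tag_end_py_alt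
  exact aLoop_eq_bLoop content.toList _ start (by omega)
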